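-- pv_equiv track=rewrite | github.com/Au3C2/AutoCullingF1 | sample_test_set.py | _group_bursts
-- ===== SOURCE A (Python) =====
-- def _group_bursts(filenames: list[str], seq_map: dict[str, int]) -> list[list[str]]:
--     """Group filenames into burst groups using SequenceImageNumber.
--
--     SeqNum == 1 starts a new group.
--     """
--     groups: list[list[str]] = []
--     current: list[str] = []
--
--     for fname in filenames:
--         seq = seq_map.get(fname, 1)
--         if seq == 1 and current:
--             groups.append(current)
--             current = []
--         current.append(fname)
--
--     if current:
--         groups.append(current)
--     return groups
-- ===== SOURCE B (Python) =====
-- def _group_bursts(filenames: list[str], seq_map: dict[str, int]) -> list[list[str]]: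
--     """Group filenames into burst groups, built back-to-front.
--
--     Scan right-to-left: an element with SeqNum == 1 begins (and, seen from the
--     right, closes) a group.  Groups and their members are collected in reverse
--     and flipped once at the end.
--     """
--     rev_groups: list[list[str]] = [[]]
--     for fname in reversed(filenames):
--         rev_groups[-1].append(fname)
--         if seq_map.get(fname, 1) == 1:
--             rev_groups.append([])
--     if not rev_groups[-1]:
--         rev_groups.pop()
--     return [g[::-1] for g in rev_groups][::-1]
-- ===== Notes on version B (the rewrite author's own statement) =====
-- stated objective: alternative
-- what changed: B scans the filenames right-to-left, collecting groups and their members back-to-front (a SeqNum==1 element closes the group it starts) and flipping everything once at the end, instead of A's forward pass with a groups/current accumulator pair and a final flush.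
import Mathlib
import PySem

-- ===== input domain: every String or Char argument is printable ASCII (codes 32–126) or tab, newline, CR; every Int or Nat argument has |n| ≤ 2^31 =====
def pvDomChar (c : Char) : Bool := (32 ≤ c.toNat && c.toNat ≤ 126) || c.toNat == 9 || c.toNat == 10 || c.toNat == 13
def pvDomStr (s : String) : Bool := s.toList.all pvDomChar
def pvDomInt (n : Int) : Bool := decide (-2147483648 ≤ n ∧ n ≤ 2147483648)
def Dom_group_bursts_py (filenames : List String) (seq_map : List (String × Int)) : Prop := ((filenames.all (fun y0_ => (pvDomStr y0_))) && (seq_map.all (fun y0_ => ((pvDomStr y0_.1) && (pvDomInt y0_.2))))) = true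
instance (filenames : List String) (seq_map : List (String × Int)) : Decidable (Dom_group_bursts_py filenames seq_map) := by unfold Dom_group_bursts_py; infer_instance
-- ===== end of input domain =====

-- B builds the groups back-to-front by a right-to-left scan; same O(n) cost, different decomposition.

-- ===== PORT A =====
-- seq_map.get(fname, 1): first-match lookup with default
def group_bursts_py (filenames : List String) (seq_map : List (String × Int)) : List (List String) :=
  let st := filenames.foldl (fun (st : List (List String) × List String) fname =>
      let seq := PySem.Dict.getD (PySem.Dict.mk seq_map) fname 1
      if seq = 1 ∧ st.2 ≠ [] then (st.1 ++ [st.2], [fname])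
      else (st.1, st.2 ++ [fname])) ([], [])
  if st.2 ≠ [] then st.1 ++ [st.2] else st.1

-- ===== PORT B =====
-- rev_groups[-1].append(fname) — append to the last group
def pvUpdateLast : List (List String) → String → List (List String)
  | [], _ => []
  | [g], f => [g ++ [f]]
  | g :: g' :: gs, f => g :: pvUpdateLast (g' :: gs) f

def pvStepB (seq_map : List (String × Int)) (gs : List (List String)) (fname : String) : List (List String) :=
  let gs' := pvUpdateLast gs fname
  if PySem.Dict.getD (PySem.Dict.mk seq_map) fname 1 = 1 then gs' ++ [[]] else gs'

def group_bursts_py_alt (filenames : List String) (seq_map : List (String × Int)) : List (List String) :=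
  let rev_groups := filenames.reverse.foldl (pvStepB seq_map) [[]]
  let rev_groups := match rev_groups.getLast? with
    | some [] => rev_groups.dropLast      -- if not rev_groups[-1]: rev_groups.pop()
    | _ => rev_groups
  (rev_groups.map List.reverse).reverse   -- [g[::-1] for g in rev_groups][::-1]

-- ===== PRECONDITION & SPEC =====
def Spec_group_bursts_py (filenames : List String) (seq_map : List (String × Int)) (out : List (List String)) : Prop := out = group_bursts_py_alt filenames seq_map
instance (filenames : List String) (seq_map : List (String × Int)) (out : List (List String)) : Decidable (Spec_group_bursts_py filenames seq_map out) := by unfold Spec_group_bursts_py; infer_instance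

-- ===== CLAIM (what is proved, stated in full; the proofs are below) =====
def Claim_equal_group_bursts_py : Prop := ∀ (filenames : List String) (seq_map : List (String × Int)), Dom_group_bursts_py filenames seq_map → Spec_group_bursts_py filenames seq_map (group_bursts_py filenames seq_map)

-- ===== LEMMAS AND PROOFS =====

-- Right-to-left characterisation: foldr with head = the open (leftmost) group.
def pvStepH (seq_map : List (String × Int)) (x : String) (acc : List (List String)) : List (List String) :=
  let acc' := match acc with | [] => [[x]] | g :: gs => (x :: g) :: gs
  if PySem.Dict.getD (PySem.Dict.mk seq_map) x 1 = 1 then [] :: acc' else acc'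

def pvH (seq_map : List (String × Int)) (l : List String) : List (List String) :=
  l.foldr (pvStepH seq_map) [[]]

def pvM (r : List (List String)) : List (List String) := (r.map List.reverse).reverse

def pvGlue (cur : List String) : List (List String) → List (List String)
  | [] => if cur = [] then [] else [cur]
  | g :: gs => if cur = [] ∧ g = [] then gs else (cur ++ g) :: gs

lemma pvStepH_ne_nil (m : List (String × Int)) (x : String) (a : List (List String)) :
    pvStepH m x a ≠ [] := by
  unfold pvStepH
  cases a <;> simp only [] <;> split <;> simp

lemma pvH_ne_nil (m : List (String × Int)) (l : List String) : pvH m l ≠ [] := by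
  cases l with
  | nil => simp [pvH]
  | cons x xs => exact pvStepH_ne_nil m x _

lemma pvUpdateLast_concat (gs : List (List String)) (g : List String) (f : String) :
    pvUpdateLast (gs ++ [g]) f = gs ++ [g ++ [f]] := by
  induction gs with
  | nil => rfl
  | cons h t ih =>
    cases t with
    | nil => simp [pvUpdateLast]
    | cons h' t' => simpa [pvUpdateLast] using ih

lemma pvStepB_comm (m : List (String × Int)) (x : String) (r : List (List String)) (hr : r ≠ []) :
    pvStepB m (pvM r) x = pvM (pvStepH m x r) := by
  cases r with
  | nil => exact absurd rfl hr
  | cons g gs =>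
    unfold pvStepB pvStepH pvM
    simp only [List.map_cons, List.reverse_cons]
    rw [pvUpdateLast_concat]
    split <;> simp

lemma pvFoldr_ne_nil (m : List (String × Int)) (l : List String) (r : List (List String)) (hr : r ≠ []) :
    l.foldr (pvStepH m) r ≠ [] := by
  cases l with
  | nil => exact hr
  | cons x xs => exact pvStepH_ne_nil m x _

lemma pvMirror (m : List (String × Int)) (l : List String) (r : List (List String)) (hr : r ≠ []) :
    l.reverse.foldl (pvStepB m) (pvM r) = pvM (l.foldr (pvStepH m) r) := by
  induction l with
  | nil => rfl
  | cons x xs ih =>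
    simp only [List.reverse_cons, List.foldl_append, List.foldl_cons, List.foldl_nil, ih,
      List.foldr_cons]
    exact pvStepB_comm m x _ (pvFoldr_ne_nil m xs r hr)

lemma pvUnM (r : List (List String)) : ((pvM r).map List.reverse).reverse = r := by
  simp [pvM, List.map_reverse]

-- B's result is pvGlue [] (pvH m l)
lemma pvB_eq_glue (m : List (String × Int)) (l : List String) :
    group_bursts_py_alt l m = pvGlue [] (pvH m l) := by
  unfold group_bursts_py_alt
  have h1 : l.reverse.foldl (pvStepB m) [[]] = pvM (pvH m l) := by
    have := pvMirror m l [[]] (by simp)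
    simpa [pvM, pvH] using this
  rw [h1]
  obtain ⟨g, gs, hg⟩ : ∃ g gs, pvH m l = g :: gs := by
    cases hh : pvH m l with
    | nil => exact absurd hh (pvH_ne_nil m l)
    | cons g gs => exact ⟨g, gs, rfl⟩
  rw [hg]
  by_cases hge : g = []
  · subst hge
    simp [pvM, pvGlue]
  · have : g.reverse ≠ [] := by simpa using hge
    simp only [pvM, List.map_cons, List.reverse_cons, List.getLast?_concat]
    rw [pvGlue]
    simp only [hge, and_false, if_false, List.nil_append]
    cases hgr : g.reverse with
    | nil => exact absurd hgr this
    | cons a b =>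
      have : ((((gs.map List.reverse).reverse ++ [g.reverse]).map List.reverse)).reverse = g :: gs := by
        have := pvUnM (g :: gs)
        simpa [pvM] using this
      simpa [hgr] using this

-- A's loop invariant
def pvStepA (m : List (String × Int)) (st : List (List String) × List String) (fname : String) :
    List (List String) × List String :=
  if PySem.Dict.getD (PySem.Dict.mk m) fname 1 = 1 ∧ st.2 ≠ [] then (st.1 ++ [st.2], [fname])
  else (st.1, st.2 ++ [fname])

lemma pvA_eq (l : List String) (m : List (String × Int)) :
    group_bursts_py l m =
      (let st := l.foldl (pvStepA m) ([], [])
       if st.2 ≠ [] then st.1 ++ [st.2] else st.1) := rfl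

lemma pvA_loop (m : List (String × Int)) (l : List String) :
    ∀ (groups : List (List String)) (cur : List String),
    (let st := l.foldl (pvStepA m) (groups, cur)
     if st.2 ≠ [] then st.1 ++ [st.2] else st.1)
    = groups ++ pvGlue cur (pvH m l) := by
  induction l with
  | nil =>
    intro groups cur
    by_cases hc : cur = [] <;> simp [pvH, pvGlue, hc]
  | cons x xs ih =>
    intro groups cur
    obtain ⟨g, gs, hg⟩ : ∃ g gs, pvH m xs = g :: gs := by
      cases hh : pvH m xs with
      | nil => exact absurd hh (pvH_ne_nil m xs)
      | cons g gs => exact ⟨g, gs, rfl⟩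
    have hHx : pvH m (x :: xs) = pvStepH m x (pvH m xs) := rfl
    simp only [List.foldl_cons]
    by_cases hcond : PySem.Dict.getD (PySem.Dict.mk m) x 1 = 1 ∧ cur ≠ []
    · rw [show pvStepA m (groups, cur) x = (groups ++ [cur], [x]) from if_pos hcond]
      have := ih (groups ++ [cur]) [x]
      simp only [this, hHx, hg, pvStepH, hcond.1, if_pos]
      simp [pvGlue, hcond.2]
    · rw [show pvStepA m (groups, cur) x = (groups, cur ++ [x]) from if_neg hcond]
      have := ih groups (cur ++ [x])
      simp only [this, hHx, hg, pvStepH]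
      by_cases hseq : PySem.Dict.getD (PySem.Dict.mk m) x 1 = 1
      · have hcur : cur = [] := by
          by_contra hne
          exact hcond ⟨hseq, hne⟩
        subst hcur
        simp [hseq, pvGlue]
      · simp only [hseq, if_false]
        by_cases hc : cur = [] <;> simp [pvGlue, hc]

-- ===== VERDICT (by name: the statement is the Claim_ definition above) =====
theorem group_bursts_py_spec : Claim_equal_group_bursts_py := by
  intro filenames seq_map _
  unfold Spec_group_bursts_py
  rw [pvB_eq_glue, pvA_eq]
  simpa using pvA_loop seq_map filenames [] []
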